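-- pv_equiv track=rewrite | github.com/JamesLeberknight/footbag-results | tools/50_build_review_packet.py | render_pbp_full
-- ===== SOURCE A (Python) =====
-- from collections import defaultdict
--
-- def render_pbp_full(pbp_rows, max_chars=500):
--     if not pbp_rows:
--         return "(no canonical results)"
--     by_div = defaultdict(list)
--     for r in pbp_rows:
--         div = r.get('division_canon', '')
--         by_div[div].append(r)
--     lines = []
--     for div, entries in by_div.items():
--         lines.append(f"[{div}]")
--         for e in sorted(entries, key=lambda x: int(x.get('place', 99)) if str(x.get('place', 99)).isdigit() else 99):
--             place = e.get('place', '?')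
--             team = e.get('team_display_name', '')
--             person = e.get('person_canon', '')
--             name = team if team else person
--             lines.append(f"  {place}. {name}")
--     text = "\n".join(lines)
--     if len(text) > max_chars:
--         text = text[:max_chars] + "\n..."
--     return text
-- ===== SOURCE B (Python) =====
-- def render_pbp_full(pbp_rows, max_chars=500):
--     if not pbp_rows:
--         return "(no canonical results)"
--     order = {}
--     for r in pbp_rows:
--         d = r.get('division_canon', '')
--         if d not in order:
--             order[d] = len(order)
--     def pkey(e):
--         p = e.get('place', 99)
--         return int(str(p)) if str(p).isdigit() else 99
--     ordered = sorted(pbp_rows, key=lambda r: (order[r.get('division_canon', '')], pkey(r)))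
--     lines = []
--     prev = None
--     for e in ordered:
--         d = e.get('division_canon', '')
--         if prev != d:
--             lines.append(f"[{d}]")
--             prev = d
--         name = e.get('team_display_name', '') or e.get('person_canon', '')
--         lines.append(f"  {e.get('place', '?')}. {name}")
--     text = "\n".join(lines)
--     if len(text) > max_chars:
--         text = text[:max_chars] + "\n..."
--     return text
-- ===== Notes on version B (the rewrite author's own statement) =====
-- stated objective: alternative
-- what changed: Replaces A's dict-of-lists grouping followed by a per-division sort with one global stable sort of all rows under the composite key (first-appearance index of the division, place key), then a single pass that emits a [division] header whenever the division changes.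
import Mathlib
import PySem

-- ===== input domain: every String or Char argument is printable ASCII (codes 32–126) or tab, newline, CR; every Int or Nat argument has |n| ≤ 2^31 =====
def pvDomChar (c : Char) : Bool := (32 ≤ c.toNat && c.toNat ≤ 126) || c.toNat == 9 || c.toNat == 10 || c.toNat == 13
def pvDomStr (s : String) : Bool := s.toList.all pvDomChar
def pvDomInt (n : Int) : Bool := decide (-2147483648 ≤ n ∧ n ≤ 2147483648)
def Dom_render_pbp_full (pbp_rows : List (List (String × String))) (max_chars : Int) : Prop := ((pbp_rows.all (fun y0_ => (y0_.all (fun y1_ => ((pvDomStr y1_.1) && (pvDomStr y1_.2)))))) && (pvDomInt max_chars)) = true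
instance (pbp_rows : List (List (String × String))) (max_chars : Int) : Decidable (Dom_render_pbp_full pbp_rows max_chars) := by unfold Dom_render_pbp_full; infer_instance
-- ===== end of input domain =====

-- B replaces A's dict-of-lists grouping + per-division sort with ONE stable sort under the
-- composite key (division first-appearance index, place key) and a single header-emitting pass
-- (objective: alternative decomposition, same cost).

-- ===== PORT A =====
-- r.get(key, dflt) on a row dict
def pvGet (r : List (String × String)) (key dflt : String) : String :=
  ((PySem.Dict.mk r).get? key).getD dflt

-- r.get('division_canon', '')
def pvDiv (r : List (String × String)) : String := pvGet r "division_canon" ""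

-- int(x.get('place', 99)) if str(x.get('place', 99)).isdigit() else 99
-- (absent key: str(99) = "99" is a digit string and int("99") = 99; under the isdigit guard
-- int(s) never raises, so the total form (ofStr? s).getD 99 is exact)
def pvPlaceKey (e : List (String × String)) : Int :=
  match (PySem.Dict.mk e).get? "place" with
  | none => 99
  | some s => if PySem.Str.strIsdigit s then (PySem.Int.ofStr? s).getD 99 else 99

-- f"  {place}. {name}" with name = team if team else person (truthiness of str = nonempty)
def pvLine (e : List (String × String)) : String :=
  "  " ++ pvGet e "place" "?" ++ ". " ++
    (if pvGet e "team_display_name" "" ≠ "" then pvGet e "team_display_name" ""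
     else pvGet e "person_canon" "")

-- text = "\n".join(lines); if len(text) > max_chars: text = text[:max_chars] + "\n..."
-- (this trailing code is identical in both Pythons)
def pvFinish (lines : List String) (max_chars : Int) : String :=
  let text := PySem.Str.join "\n" lines
  if max_chars < PySem.Str.len text then PySem.Str.slice text none (some max_chars) ++ "\n..." else text

def render_pbp_full (pbp_rows : List (List (String × String))) (max_chars : Int) : String :=
  if pbp_rows = [] then "(no canonical results)" else
  -- by_div = defaultdict(list); for r in pbp_rows: by_div[r.get('division_canon','')].append(r)
  let by_div : PySem.Dict String (List (List (String × String))) :=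
    pbp_rows.foldl (fun d r => d.modify (pvDiv r) [] (· ++ [r])) PySem.Dict.empty
  -- for div, entries in by_div.items(): lines.append(f"[{div}]"); for e in sorted(entries, key=…): lines.append(f"  {place}. {name}")
  let lines : List String :=
    by_div.items.foldl
      (fun acc p =>
        (PySem.List.sorted p.2 pvPlaceKey false).foldl
          (fun acc2 e => acc2 ++ [pvLine e]) (acc ++ ["[" ++ p.1 ++ "]"])) []
  pvFinish lines max_chars

-- ===== PORT B =====
-- order = {}; for r in pbp_rows: d = r.get('division_canon',''); if d not in order: order[d] = len(order)
def pvOrder (l : List (List (String × String))) : PySem.Dict String Int :=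
  l.foldl (fun o r => if o.contains (pvDiv r) then o else o.insert (pvDiv r) (o.size : Int)) PySem.Dict.empty

-- loop body: emit a [division] header when the division changes, then the entry line
def pvEmit (st : List String × Option String) (e : List (String × String)) :
    List String × Option String :=
  let st' := if st.2 ≠ some (pvDiv e) then (st.1 ++ ["[" ++ pvDiv e ++ "]"], some (pvDiv e)) else st
  (st'.1 ++ [pvLine e], st'.2)

def render_pbp_full_alt (pbp_rows : List (List (String × String))) (max_chars : Int) : String :=
  if pbp_rows = [] then "(no canonical results)" else
  let order := pvOrder pbp_rows
  -- ordered = sorted(pbp_rows, key=lambda r: (order[r.get('division_canon','')], pkey(r)))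
  -- (order[d] never raises: every division was inserted above, so getD's default is never read)
  let ordered := PySem.List.sorted2 pbp_rows (fun r => order.getD (pvDiv r) 0) pvPlaceKey false
  -- lines = []; prev = None; for e in ordered: pvEmit
  let st := ordered.foldl pvEmit ([], none)
  pvFinish st.1 max_chars

-- ===== PRECONDITION & SPEC =====
def Spec_render_pbp_full (pbp_rows : List (List (String × String))) (max_chars : Int) (out : String) : Prop := out = render_pbp_full_alt pbp_rows max_chars
instance (pbp_rows : List (List (String × String))) (max_chars : Int) (out : String) : Decidable (Spec_render_pbp_full pbp_rows max_chars out) := by unfold Spec_render_pbp_full; infer_instance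

-- ===== CLAIM (what is proved, stated in full; the proofs are below) =====
def Claim_equal_render_pbp_full : Prop := ∀ (pbp_rows : List (List (String × String))) (max_chars : Int), Dom_render_pbp_full pbp_rows max_chars → Spec_render_pbp_full pbp_rows max_chars (render_pbp_full pbp_rows max_chars)

-- ===== LEMMAS AND PROOFS =====
def pvGroup (l : List (List (String × String))) (d : String) : List (List (String × String)) :=
  l.filter (fun r => pvDiv r == d)

def pvDivs (l : List (List (String × String))) : List String := PySem.Set.ofList (l.map pvDiv)

lemma mem_pvGroup {l : List (List (String × String))} {d : String} {y : List (String × String)} :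
    y ∈ pvGroup l d ↔ y ∈ l ∧ pvDiv y = d := by
  simp [pvGroup]

lemma mem_pvDivs {l : List (List (String × String))} {d : String} :
    d ∈ pvDivs l ↔ ∃ r ∈ l, pvDiv r = d := by
  simp [pvDivs, PySem.Set.mem_ofList, eq_comm]

-- A's grouping dict: items = divisions in first-appearance order, each with its filtered group
lemma pvA_items (l : List (List (String × String))) :
    (l.foldl (fun d r => d.modify (pvDiv r) [] (· ++ [r])) PySem.Dict.empty).items
      = (pvDivs l).map (fun d => (d, pvGroup l d)) := by
  have hkeys : (l.foldl (fun d r => d.modify (pvDiv r) [] (· ++ [r])) PySem.Dict.empty).keys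
      = pvDivs l := by
    have := PySem.Dict.keys_foldl_modify_key l pvDiv [] (fun d x v => v ++ [x]) PySem.Dict.empty
    simpa [pvDivs, PySem.Set.update_nil_left, PySem.Dict.keys_empty] using this
  have hnodup : (l.foldl (fun d r => d.modify (pvDiv r) [] (· ++ [r])) PySem.Dict.empty).keys.Nodup := by
    exact PySem.Dict.nodup_keys_foldl_modify_key l pvDiv [] (fun d x v => v ++ [x]) PySem.Dict.empty
      (by simp [PySem.Dict.keys_empty])
  have hgetD : ∀ c, (l.foldl (fun d r => d.modify (pvDiv r) [] (· ++ [r])) PySem.Dict.empty).getD c []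
      = pvGroup l c := by
    intro c
    have h := PySem.Dict.getD_foldl_modify_append (l.map (fun r => (pvDiv r, r))) PySem.Dict.empty c
    rw [List.foldl_map] at h
    rw [List.filter_map] at h
    simp only [PySem.Dict.getD_empty, List.nil_append] at h
    rw [h, List.map_map]
    simp [pvGroup, Function.comp_def]
  rw [PySem.Dict.items_eq_map_keys _ hnodup []]
  rw [hkeys]
  exact List.map_congr_left (fun d _ => by rw [hgetD])

lemma pvOrder_items (l : List (List (String × String))) :
    (pvOrder l).items = (pvDivs l).zipIdx.map (fun p => (p.1, (p.2 : Int))) := by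
  induction l using List.reverseRecOn with
  | nil => simp [pvOrder, pvDivs, PySem.Set.ofList_nil, PySem.Dict.empty]
  | append_singleton l x ih =>
    have hkeys : (pvOrder l).keys = pvDivs l := by
      have : (pvOrder l).keys = (pvOrder l).items.map (·.1) := rfl
      rw [this, ih, List.map_map]
      simp [Function.comp_def]
    have hdivs : pvDivs (l ++ [x]) = (PySem.Set.ofList (l.map pvDiv)).add (pvDiv x) := by
      simp [pvDivs, PySem.Set.ofList_append_singleton]
    have hsize : (pvOrder l).size = (pvDivs l).length := by
      have : (pvOrder l).size = (pvOrder l).items.length := rfl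
      rw [this, ih]; simp
    have hstep : pvOrder (l ++ [x])
        = if (pvOrder l).contains (pvDiv x) then pvOrder l
          else (pvOrder l).insert (pvDiv x) ((pvOrder l).size : Int) := by
      simp [pvOrder, List.foldl_append]
    by_cases hm : pvDiv x ∈ pvDivs l
    · have hc : (pvOrder l).contains (pvDiv x) = true := by
        rw [PySem.Dict.contains_eq_decide_mem_keys, hkeys]; simpa using hm
      rw [hstep, hc, if_pos rfl, ih, hdivs]
      rw [PySem.Set.add_of_mem (by simpa [pvDivs] using hm)]
      rfl
    · have hc : (pvOrder l).contains (pvDiv x) = false := by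
        rw [PySem.Dict.contains_eq_decide_mem_keys, hkeys]; simpa using hm
      rw [hstep, hc, if_neg (by simp), PySem.Dict.items_insert_of_not_contains _ _ hc, ih, hdivs]
      rw [PySem.Set.add_of_not_mem (by simpa [pvDivs] using hm)]
      rw [List.zipIdx_append, List.map_append, hsize]
      simp [pvDivs]

lemma pvOrder_getD (l : List (List (String × String))) (i : Nat) (h : i < (pvDivs l).length) :
    (pvOrder l).getD ((pvDivs l)[i]) 0 = (i : Int) := by
  have hkeys : (pvOrder l).keys = pvDivs l := by
    have : (pvOrder l).keys = (pvOrder l).items.map (·.1) := rfl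
    rw [this, pvOrder_items, List.map_map]; simp [Function.comp_def]
  have hnodup : (pvOrder l).keys.Nodup := by
    rw [hkeys]; exact PySem.Set.nodup_ofList _
  have hmem : ((pvDivs l)[i], (i : Int)) ∈ (pvOrder l).items := by
    rw [pvOrder_items]
    have hz : ((pvDivs l)[i], i) ∈ (pvDivs l).zipIdx := by
      rw [List.mem_iff_getElem]
      exact ⟨i, by simpa using h, by simp [List.getElem_zipIdx]⟩
    exact List.mem_map.mpr ⟨_, hz, rfl⟩
  exact PySem.Dict.getD_of_mem_items _ hmem hnodup 0

lemma pvOrder_pairwise (l : List (List (String × String))) :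
    (pvDivs l).Pairwise (fun a b => (pvOrder l).getD a 0 < (pvOrder l).getD b 0) := by
  rw [List.pairwise_iff_getElem]
  intro i j hi hj hij
  rw [pvOrder_getD l i hi, pvOrder_getD l j hj]
  exact_mod_cast hij

lemma insertBy_append_left {α : Type} (before : α → α → Bool) (x : α) (L1 rest : List α)
    (h : ∀ y ∈ L1, before x y = false) :
    PySem.List.insertBy before x (L1 ++ rest) = L1 ++ PySem.List.insertBy before x rest := by
  induction L1 with
  | nil => simp
  | cons y L1' ih =>
    have hy : before x y = false := h y (by simp)
    simp only [List.cons_append, PySem.List.insertBy, hy, Bool.false_eq_true, if_false]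
    rw [ih (fun z hz => h z (by simp [hz]))]

lemma insertBy_append_right {α : Type} (before before' : α → α → Bool) (x : α) (M L2 : List α)
    (hM : ∀ y ∈ M, before x y = before' x y) (hL2 : ∀ y ∈ L2, before x y = true) :
    PySem.List.insertBy before x (M ++ L2) = PySem.List.insertBy before' x M ++ L2 := by
  induction M with
  | nil =>
    cases L2 with
    | nil => simp [PySem.List.insertBy]
    | cons z L2' =>
      have hz : before x z = true := hL2 z (by simp)
      simp [PySem.List.insertBy, hz]
  | cons y M' ih =>
    have hy : before x y = before' x y := hM y (by simp)
    by_cases hb : before' x y = true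
    · simp [PySem.List.insertBy, hy, hb]
    · simp only [List.cons_append, PySem.List.insertBy, hy,
        Bool.not_eq_true] at hb ⊢
      rw [hb]
      simp only [Bool.false_eq_true, if_false]
      rw [ih (fun z hz => hM z (by simp [hz]))]
      simp

lemma sorted_append_singleton {α κ : Type} [LinearOrder κ] (l : List α) (x : α) (key : α → κ) :
    PySem.List.sorted (l ++ [x]) key false
      = PySem.List.insertBy (fun a b => decide (key a < key b)) x (PySem.List.sorted l key false) := by
  rw [PySem.List.sorted_eq_foldl_insertBy, PySem.List.sorted_eq_foldl_insertBy, List.foldl_append]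
  rfl

lemma sorted2_append_singleton {α : Type} (l : List α) (x : α) (k1 k2 : α → Int) :
    PySem.List.sorted2 (l ++ [x]) k1 k2 false
      = PySem.List.insertBy
          (fun a b => decide (k1 a < k1 b) || (!decide (k1 b < k1 a) && decide (k2 a < k2 b)))
          x (PySem.List.sorted2 l k1 k2 false) := by
  simp [PySem.List.sorted2, List.foldl_append]

lemma pvDiv_of_mem_sortedGroup {l : List (List (String × String))} {d : String} {y : List (String × String)}
    (h : y ∈ PySem.List.sorted (pvGroup l d) pvPlaceKey false) : pvDiv y = d :=
  (mem_pvGroup.mp ((PySem.List.mem_sorted _ _ _ _).mp h)).2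

lemma pvGroup_append_ne (l : List (List (String × String))) (x : List (String × String)) {d : String} (h : d ≠ pvDiv x) :
    pvGroup (l ++ [x]) d = pvGroup l d := by
  simp [pvGroup, List.filter_append, Ne.symm h]

lemma pvGroup_append_self (l : List (List (String × String))) (x : List (String × String)) :
    pvGroup (l ++ [x]) (pvDiv x) = pvGroup l (pvDiv x) ++ [x] := by
  simp [pvGroup, List.filter_append]

lemma pv_sort_flatMap (rank : String → Int) :
    ∀ l : List (List (String × String)), (pvDivs l).Pairwise (fun a b => rank a < rank b) →
      PySem.List.sorted2 l (fun r => rank (pvDiv r)) pvPlaceKey false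
        = (pvDivs l).flatMap (fun d => PySem.List.sorted (pvGroup l d) pvPlaceKey false) := by
  intro l
  induction l using List.reverseRecOn with
  | nil => intro _; rfl
  | append_singleton l x ih =>
    intro hp
    have hD' : pvDivs (l ++ [x]) = PySem.Set.add (pvDivs l) (pvDiv x) := by
      simp [pvDivs, PySem.Set.ofList_append_singleton]
    rw [hD'] at hp
    have hsub : (pvDivs l).Sublist (PySem.Set.add (pvDivs l) (pvDiv x)) := by
      rw [PySem.Set.add_eq_ite]
      split
      · exact List.Sublist.refl _
      · exact List.sublist_append_left _ _
    have hpD : (pvDivs l).Pairwise (fun a b => rank a < rank b) := hp.sublist hsub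
    have IH := ih hpD
    rw [sorted2_append_singleton, IH, hD']
    by_cases hm : pvDiv x ∈ pvDivs l
    · -- existing division: insert x into its block
      rw [PySem.Set.add_of_mem hm] at hp ⊢
      obtain ⟨D1, D2, hsplit⟩ := List.append_of_mem hm
      have hnd : (pvDivs l).Nodup := PySem.Set.nodup_ofList _
      rw [hsplit] at hp hnd ⊢
      obtain ⟨hndD1, hndc, hdisj⟩ := List.nodup_append.mp hnd
      have hnd1 : pvDiv x ∉ D1 := fun hc => hdisj _ hc (pvDiv x) (by simp) rfl
      have hnd2 : pvDiv x ∉ D2 := (List.nodup_cons.mp hndc).1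
      have hr1 : ∀ d ∈ D1, rank d < rank (pvDiv x) := by
        intro d hd
        exact (List.pairwise_append.mp hp).2.2 d hd (pvDiv x) (by simp)
      have hr2 : ∀ d ∈ D2, rank (pvDiv x) < rank d := by
        intro d hd
        exact (List.pairwise_cons.mp (List.pairwise_append.mp hp).2.1).1 d hd
      rw [List.flatMap_append, List.flatMap_cons, List.flatMap_append, List.flatMap_cons]
      have e1 := insertBy_append_left
        (fun a b => decide (rank (pvDiv a) < rank (pvDiv b)) ||
          (!decide (rank (pvDiv b) < rank (pvDiv a)) && decide (pvPlaceKey a < pvPlaceKey b)))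
        x (D1.flatMap (fun d => PySem.List.sorted (pvGroup l d) pvPlaceKey false))
        (PySem.List.sorted (pvGroup l (pvDiv x)) pvPlaceKey false ++
          D2.flatMap (fun d => PySem.List.sorted (pvGroup l d) pvPlaceKey false))
        (by
          intro y hy
          obtain ⟨d, hd, hyd⟩ := List.mem_flatMap.mp hy
          have hdy : pvDiv y = d := pvDiv_of_mem_sortedGroup hyd
          have h1 := hr1 d hd
          have h2 : ¬ (rank (pvDiv x) < rank d) := by omega
          simp [hdy, h1, h2])
      rw [e1]
      have e2 := insertBy_append_right
        (fun a b => decide (rank (pvDiv a) < rank (pvDiv b)) ||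
          (!decide (rank (pvDiv b) < rank (pvDiv a)) && decide (pvPlaceKey a < pvPlaceKey b)))
        (fun a b => decide (pvPlaceKey a < pvPlaceKey b))
        x (PySem.List.sorted (pvGroup l (pvDiv x)) pvPlaceKey false)
        (D2.flatMap (fun d => PySem.List.sorted (pvGroup l d) pvPlaceKey false))
        (by
          intro y hy
          have hdy : pvDiv y = pvDiv x := pvDiv_of_mem_sortedGroup hy
          simp [hdy])
        (by
          intro y hy
          obtain ⟨d, hd, hyd⟩ := List.mem_flatMap.mp hy
          have hdy : pvDiv y = d := pvDiv_of_mem_sortedGroup hyd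
          have := hr2 d hd
          simp [hdy, this])
      rw [e2]
      have hcongr1 : D1.flatMap (fun d => PySem.List.sorted (pvGroup (l ++ [x]) d) pvPlaceKey false)
          = D1.flatMap (fun d => PySem.List.sorted (pvGroup l d) pvPlaceKey false) :=
        List.flatMap_congr (fun d hd => by rw [pvGroup_append_ne l x (fun he => hnd1 (he ▸ hd))])
      have hcongr2 : D2.flatMap (fun d => PySem.List.sorted (pvGroup (l ++ [x]) d) pvPlaceKey false)
          = D2.flatMap (fun d => PySem.List.sorted (pvGroup l d) pvPlaceKey false) :=
        List.flatMap_congr (fun d hd => by rw [pvGroup_append_ne l x (fun he => hnd2 (he ▸ hd))])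
      rw [hcongr1, hcongr2, pvGroup_append_self, sorted_append_singleton]
    · -- new division: x's block is appended at the end
      rw [PySem.Set.add_of_not_mem hm] at hp ⊢
      have hgnil : pvGroup l (pvDiv x) = [] := by
        simp only [pvGroup, List.filter_eq_nil_iff]
        intro r hr
        simp only [beq_iff_eq]
        intro he
        exact hm (mem_pvDivs.mpr ⟨r, hr, he⟩)
      have hbefore : ∀ y ∈ (pvDivs l).flatMap
          (fun d => PySem.List.sorted (pvGroup l d) pvPlaceKey false),
          (fun a b => decide (rank (pvDiv a) < rank (pvDiv b)) ||
            (!decide (rank (pvDiv b) < rank (pvDiv a)) && decide (pvPlaceKey a < pvPlaceKey b))) x y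
            = false := by
        intro y hy
        obtain ⟨d, hd, hyd⟩ := List.mem_flatMap.mp hy
        have hdy : pvDiv y = d := pvDiv_of_mem_sortedGroup hyd
        have h1 : rank d < rank (pvDiv x) :=
          (List.pairwise_append.mp hp).2.2 d hd (pvDiv x) (by simp)
        have h2 : ¬ (rank (pvDiv x) < rank d) := by omega
        simp [hdy, h1, h2]
      rw [PySem.List.insertBy_of_forall_not_before _ _ _ hbefore]
      rw [List.flatMap_append, List.flatMap_singleton, pvGroup_append_self, hgnil]
      have hcongr : (pvDivs l).flatMap (fun d => PySem.List.sorted (pvGroup (l ++ [x]) d) pvPlaceKey false)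
          = (pvDivs l).flatMap (fun d => PySem.List.sorted (pvGroup l d) pvPlaceKey false) :=
        List.flatMap_congr (fun d hd => by rw [pvGroup_append_ne l x (fun he => hm (he ▸ hd))])
      rw [hcongr]
      rfl

lemma pvEmit_run_same (d : String) :
    ∀ (es : List (List (String × String))) (acc : List String), (∀ e ∈ es, pvDiv e = d) →
      es.foldl pvEmit (acc, some d) = (acc ++ es.map pvLine, some d) := by
  intro es
  induction es with
  | nil => intro acc _; simp
  | cons e es ih =>
    intro acc h
    have hd : pvDiv e = d := h e (by simp)
    have hstep : pvEmit (acc, some d) e = (acc ++ [pvLine e], some d) := by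
      simp [pvEmit, hd]
    rw [List.foldl_cons, hstep, ih _ (fun e' he' => h e' (by simp [he']))]
    simp

lemma pvEmit_run_flatMap :
    ∀ (ds : List String) (B : String → List (List (String × String))) (acc : List String) (prev : Option String),
      ds.Nodup → (∀ d ∈ ds, prev ≠ some d) → (∀ d ∈ ds, B d ≠ []) →
      (∀ d ∈ ds, ∀ e ∈ B d, pvDiv e = d) →
      (ds.flatMap B).foldl pvEmit (acc, prev)
        = (acc ++ ds.flatMap (fun d => ("[" ++ d ++ "]") :: (B d).map pvLine),
           ds.foldl (fun _ d => some d) prev) := by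
  intro ds
  induction ds with
  | nil => intro B acc prev _ _ _ _; simp
  | cons d ds ih =>
    intro B acc prev hnd hprev hne hdiv
    obtain ⟨hd1, hd2⟩ := List.nodup_cons.mp hnd
    rw [List.flatMap_cons, List.foldl_append]
    obtain ⟨e, es, hB⟩ := List.exists_cons_of_ne_nil (hne d (by simp))
    have hde : pvDiv e = d := hdiv d (by simp) e (by simp [hB])
    have hstep : pvEmit (acc, prev) e
        = (acc ++ ["[" ++ d ++ "]"] ++ [pvLine e], some d) := by
      have hp' : prev ≠ some d := hprev d (by simp)
      simp [pvEmit, hde, hp']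
    have hrun := pvEmit_run_same d es (acc ++ ["[" ++ d ++ "]"] ++ [pvLine e])
      (fun e' he' => hdiv d (by simp) e' (by simp [hB, he']))
    rw [hB, List.foldl_cons, hstep, hrun]
    rw [ih B _ (some d) hd2 (fun d' hd' hc => by obtain rfl := Option.some.inj hc; exact hd1 hd')
      (fun d' hd' => hne d' (by simp [hd'])) (fun d' hd' => hdiv d' (by simp [hd']))]
    simp [hB]

lemma pvLinesA (l : List (List (String × String))) :
    ((l.foldl (fun d r => d.modify (pvDiv r) [] (· ++ [r])) PySem.Dict.empty).items).foldl
      (fun acc p =>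
        (PySem.List.sorted p.2 pvPlaceKey false).foldl
          (fun acc2 e => acc2 ++ [pvLine e]) (acc ++ ["[" ++ p.1 ++ "]"])) []
    = (pvDivs l).flatMap
        (fun d => ("[" ++ d ++ "]") :: (PySem.List.sorted (pvGroup l d) pvPlaceKey false).map pvLine) := by
  rw [pvA_items, List.foldl_map]
  show (pvDivs l).foldl
      (fun acc d =>
        (PySem.List.sorted (pvGroup l d) pvPlaceKey false).foldl
          (fun acc2 e => acc2 ++ [pvLine e]) (acc ++ ["[" ++ d ++ "]"])) [] = _
  have hcong : ∀ (acc : List String) (d : String), d ∈ pvDivs l →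
      (PySem.List.sorted (pvGroup l d) pvPlaceKey false).foldl
          (fun acc2 e => acc2 ++ [pvLine e]) (acc ++ ["[" ++ d ++ "]"])
        = acc ++ (("[" ++ d ++ "]") :: (PySem.List.sorted (pvGroup l d) pvPlaceKey false).map pvLine) := by
    intro acc d _
    rw [PySem.List.foldl_append_singleton_eq_map]
    simp
  rw [PySem.List.foldl_congr_mem (pvDivs l) _
    (fun acc d => acc ++ (("[" ++ d ++ "]") :: (PySem.List.sorted (pvGroup l d) pvPlaceKey false).map pvLine))
    [] hcong]
  rw [PySem.List.foldl_append_eq_flatMap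
    (fun d => ("[" ++ d ++ "]") :: (PySem.List.sorted (pvGroup l d) pvPlaceKey false).map pvLine)
    (pvDivs l) []]
  simp

lemma pvLinesB (l : List (List (String × String))) :
    (PySem.List.sorted2 l (fun r => (pvOrder l).getD (pvDiv r) 0) pvPlaceKey false).foldl
        pvEmit ([], none)
      = ((pvDivs l).flatMap
          (fun d => ("[" ++ d ++ "]") :: (PySem.List.sorted (pvGroup l d) pvPlaceKey false).map pvLine),
         (pvDivs l).foldl (fun _ d => some d) none) := by
  rw [pv_sort_flatMap (fun d => (pvOrder l).getD d 0) l (pvOrder_pairwise l)]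
  rw [pvEmit_run_flatMap (pvDivs l) _ [] none (PySem.Set.nodup_ofList _) (by simp)
    (fun d hd => by
      rw [Ne, PySem.List.sorted_eq_nil_iff]
      obtain ⟨r, hr, hrd⟩ := mem_pvDivs.mp hd
      intro hc
      exact (List.ne_nil_of_mem (mem_pvGroup.mpr ⟨hr, hrd⟩)) hc)
    (fun d _ e he => pvDiv_of_mem_sortedGroup he)]
  simp

-- ===== VERDICT (by name: the statement is the Claim_ definition above) =====
theorem render_pbp_full_spec : Claim_equal_render_pbp_full := by
  unfold Claim_equal_render_pbp_full
  intro rows mc _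
  unfold Spec_render_pbp_full render_pbp_full render_pbp_full_alt
  by_cases h : rows = []
  · simp [h]
  · simp only [if_neg h]
    rw [pvLinesA rows, pvLinesB rows]
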